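-- pv_equiv track=rewrite | github.com/yitiro/leetcode | 2107.py | shareCandies
-- ===== SOURCE A (Python) =====
-- from typing import List
--
-- def shareCandies(candies: List[int], k: int) -> int:
--     # if k < 2:
--     #     return min(len(set(candies)), len(candies) - k)
--     if k == 0:
--         return len(set(candies))
--     from collections import defaultdict
--     keeps = defaultdict(int)
--     for i in range(k, len(candies)):
--         keeps[candies[i]] += 1
--
--     num_flavor = len(keeps.keys())
--     max_flavor = num_flavor
--
--     for i in range(k, len(candies)):
--         if candies[i] == candies[i - k]:
--             continue
--         keeps[candies[i]] -= 1
--         keeps[candies[i - k]] += 1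
--         if keeps[candies[i]] == 0:
--             num_flavor -= 1
--         if keeps[candies[i - k]] == 1:
--             num_flavor += 1
--             max_flavor = max(num_flavor, max_flavor)
--
--
--     return max_flavor
-- ===== SOURCE B (Python) =====
-- def shareCandies(candies, k):
--     n = len(candies)
--     best = 0
--     for s in range(0, n - k + 1):
--         kept = candies[:s] + candies[s + k:]
--         best = max(best, len(set(kept)))
--     return best
-- ===== Notes on version B (the rewrite author's own statement) =====
-- stated objective: simpler
-- what changed: Replaces A's incremental sliding-window counter bookkeeping (defaultdict of kept counts updated per shift, plus num/max flavor tracking) by a plain brute-force scan that, for each window start s, rebuilds the kept list candies[:s]+candies[s+k:] and takes len(set(kept)), with no special case for k == 0.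
import Mathlib
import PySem

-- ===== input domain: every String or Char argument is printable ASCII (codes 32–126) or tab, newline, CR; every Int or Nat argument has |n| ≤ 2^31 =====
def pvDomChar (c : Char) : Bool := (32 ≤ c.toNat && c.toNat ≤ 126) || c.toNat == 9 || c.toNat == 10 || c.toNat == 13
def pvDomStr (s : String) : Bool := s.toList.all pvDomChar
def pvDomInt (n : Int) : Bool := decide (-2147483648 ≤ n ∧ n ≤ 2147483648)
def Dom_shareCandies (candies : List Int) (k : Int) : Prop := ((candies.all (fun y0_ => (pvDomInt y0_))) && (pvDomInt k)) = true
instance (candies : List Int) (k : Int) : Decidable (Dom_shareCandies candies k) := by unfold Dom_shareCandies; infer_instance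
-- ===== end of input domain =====

-- B replaces A's incremental sliding-window counter bookkeeping by a plain brute-force
-- scan over window starts (rebuild kept = candies[:s]+candies[s+k:], take len(set(kept))):
-- simpler, no k == 0 special case; not faster.

-- ===== PORT A =====
def shareCandies (candies : List Int) (k : Int) : Int :=
  if k == 0 then ((PySem.Set.ofList candies).length : Int)
  else
    let n : Int := candies.length
    let keeps : PySem.Dict Int Int :=
      (PySem.List.pyRange k n 1).foldl
        (fun d i =>
          d.insert (PySem.List.pyGetD candies i 0) (d.getD (PySem.List.pyGetD candies i 0) 0 + 1))
        PySem.Dict.empty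
    let num0 : Int := (keeps.keys.length : Int)
    let st :=
      (PySem.List.pyRange k n 1).foldl
        (fun (st : PySem.Dict Int Int × Int × Int) i =>
          let ci := PySem.List.pyGetD candies i 0
          let cik := PySem.List.pyGetD candies (i - k) 0
          if ci == cik then st
          else
            let d1 := st.1.insert ci (st.1.getD ci 0 - 1)
            let d2 := d1.insert cik (d1.getD cik 0 + 1)
            let num1 := if d2.getD ci 0 == 0 then st.2.1 - 1 else st.2.1
            if d2.getD cik 0 == 1 then (d2, num1 + 1, max (num1 + 1) st.2.2)
            else (d2, num1, st.2.2))
        (keeps, num0, num0)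
    st.2.2

-- ===== PORT B =====
def shareCandies_alt (candies : List Int) (k : Int) : Int :=
  let n : Int := candies.length
  (PySem.List.pyRange 0 (n - k + 1) 1).foldl
    (fun best s =>
      let kept := PySem.List.slice candies none (some s) ++ PySem.List.slice candies (some (s + k)) none
      max best ((PySem.Set.ofList kept).length : Int))
    0

-- ===== PRECONDITION & SPEC =====
-- Pre_ excludes exactly k < 0, on which the Python A always raises IndexError
-- (candies[i - k] with i - k ≥ len(candies) on the last loop iteration).
def Pre_shareCandies (candies : List Int) (k : Int) : Prop := 0 ≤ k
instance (candies : List Int) (k : Int) : Decidable (Pre_shareCandies candies k) := by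
  unfold Pre_shareCandies; infer_instance
def pvWitness_shareCandies : List Int × Int := ([1, 2, 2, 3], 2)

def Spec_shareCandies (candies : List Int) (k : Int) (out : Int) : Prop := out = shareCandies_alt candies k
instance (candies : List Int) (k : Int) (out : Int) : Decidable (Spec_shareCandies candies k out) := by
  unfold Spec_shareCandies; infer_instance

-- ===== CLAIM (what is proved, stated in full; the proofs are below) =====
def Claim_equal_shareCandies : Prop := ∀ (candies : List Int) (k : Int), Dom_shareCandies candies k → Pre_shareCandies candies k → Spec_shareCandies candies k (shareCandies candies k)

-- ===== LEMMAS AND PROOFS =====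

-- the kept list when the window of size kn starting at s is removed
def pvKept (c : List Int) (kn s : Nat) : List Int := c.take s ++ c.drop (s + kn)

-- number of distinct kept flavors, as an Int
def pvF (c : List Int) (kn : Nat) (s : Nat) : Int := ((PySem.Set.ofList (pvKept c kn s)).length : Int)

-- running maximum of f 0 .. f (m-1), floored at 0
def pvRunMax (f : Nat → Int) (m : Nat) : Int := (List.range m).foldl (fun b j => max b (f j)) 0

-- A's loop body and loop state (proof-side names for the inline lambda of the port)
def pvStepA (c : List Int) (k : Int) (st : PySem.Dict Int Int × Int × Int) (i : Int) :
    PySem.Dict Int Int × Int × Int :=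
  let ci := PySem.List.pyGetD c i 0
  let cik := PySem.List.pyGetD c (i - k) 0
  if ci == cik then st
  else
    let d1 := st.1.insert ci (st.1.getD ci 0 - 1)
    let d2 := d1.insert cik (d1.getD cik 0 + 1)
    let num1 := if d2.getD ci 0 == 0 then st.2.1 - 1 else st.2.1
    if d2.getD cik 0 == 1 then (d2, num1 + 1, max (num1 + 1) st.2.2)
    else (d2, num1, st.2.2)

def pvInit (c : List Int) (kn : Nat) : PySem.Dict Int Int × Int × Int :=
  (PySem.Dict.counter (c.drop kn),
   ((PySem.Set.ofList (c.drop kn)).length : Int),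
   ((PySem.Set.ofList (c.drop kn)).length : Int))

def pvIter (c : List Int) (kn j : Nat) : PySem.Dict Int Int × Int × Int :=
  (List.range j).foldl (fun st (t : Nat) => pvStepA c (kn : Int) st ((kn : Int) + (t : Int))) (pvInit c kn)

lemma pvSetLen (l : List Int) : ((PySem.Set.ofList l).length : Int) = (l.toFinset.card : Int) := by
  have h1 : (PySem.Set.ofList l).toFinset.card = (PySem.Set.ofList l).length :=
    List.toFinset_card_of_nodup (PySem.Set.nodup_ofList l)
  have h2 : (PySem.Set.ofList l).toFinset = l.toFinset := by
    ext x; simp [PySem.Set.mem_ofList]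
  rw [← h1, h2]

lemma pvF_card (c : List Int) (kn s : Nat) :
    pvF c kn s = ((pvKept c kn s).toFinset.card : Int) := pvSetLen _

lemma pvF_nonneg (c : List Int) (kn s : Nat) : 0 ≤ pvF c kn s := Int.natCast_nonneg _

lemma pvRunMax_succ (f : Nat → Int) (m : Nat) :
    pvRunMax f (m + 1) = max (pvRunMax f m) (f m) := by
  simp [pvRunMax, List.range_succ]

lemma pvLe_runMax (f : Nat → Int) {t m : Nat} (h : t < m) : f t ≤ pvRunMax f m := by
  induction m with
  | zero => omega
  | succ m ih =>
    rw [pvRunMax_succ]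
    rcases Nat.lt_succ_iff_lt_or_eq.mp h with h' | h'
    · exact le_trans (ih h') (le_max_left _ _)
    · subst h'; exact le_max_right _ _

lemma pvRunMax_const (L : Int) (h : 0 ≤ L) (m : Nat) :
    pvRunMax (fun _ => L) (m + 1) = L := by
  induction m with
  | zero => simp [pvRunMax, h]
  | succ m ih => rw [pvRunMax_succ, ih, max_self]

-- one window shift: counts change by "-c[j+kn] +c[j]"
lemma pvCount_step (c : List Int) (kn j : Nat) (h : j + kn < c.length) (x : Int) :
    (pvKept c kn (j + 1)).count x + (if c.getD (j + kn) 0 = x then 1 else 0)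
      = (pvKept c kn j).count x + (if c.getD j 0 = x then 1 else 0) := by
  have hj : j < c.length := by omega
  have h1 : c.take (j + 1) = c.take j ++ [c.getD j 0] := by
    rw [List.take_add_one, List.getD_eq_getElem c 0 hj]
    simp [List.getElem?_eq_getElem hj]
  have h2 : c.drop (j + kn) = c.getD (j + kn) 0 :: c.drop (j + kn + 1) := by
    rw [List.getD_eq_getElem c 0 h]
    exact List.drop_eq_getElem_cons h
  have h3 : j + 1 + kn = j + kn + 1 := by omega
  simp only [pvKept, h3, h1, h2, List.count_append, List.count_cons, List.count_nil, beq_iff_eq]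
  split_ifs <;> omega

-- distinct-count change under a "-a +b" count shift (a ≠ b)
lemma pvCardStep (L L' : List Int) (a b : Int) (hab : a ≠ b)
    (ha : 1 ≤ L.count a)
    (hrel : ∀ x, L'.count x + (if a = x then 1 else 0) = L.count x + (if b = x then 1 else 0)) :
    ((L'.toFinset.card : Int))
      = (if L'.count b = 1 then 1 else 0) + ((L.toFinset.card : Int))
        - (if L'.count a = 0 then 1 else 0) := by
  have hca : L'.count a + 1 = L.count a := by
    have := hrel a; rw [if_pos rfl, if_neg (Ne.symm hab)] at this; omega
  have hcb : L'.count b = L.count b + 1 := by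
    have := hrel b; rw [if_neg hab, if_pos rfl] at this; omega
  have hoth : ∀ x, x ≠ a → x ≠ b → L'.count x = L.count x := by
    intro x hxa hxb
    have := hrel x
    rw [if_neg (fun h => hxa h.symm), if_neg (fun h => hxb h.symm)] at this
    omega
  have hmem : ∀ (l : List Int) (x : Int), x ∈ l.toFinset ↔ 0 < l.count x := by
    intro l x; rw [List.mem_toFinset]; exact (List.count_pos_iff).symm
  have hG : L'.toFinset = insert b (if L'.count a = 0 then L.toFinset.erase a else L.toFinset) := by
    ext x
    by_cases hxb : x = b
    · subst hxb
      simp only [Finset.mem_insert, true_or, iff_true, hmem]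
      omega
    · by_cases hxa : x = a
      · subst hxa
        simp only [Finset.mem_insert, hab, false_or] at *
        split_ifs with hz
        · simp only [Finset.mem_erase, ne_eq, not_true_eq_false, false_and, iff_false, hmem]
          omega
        · rw [hmem, hmem]; omega
      · simp only [Finset.mem_insert, hxb, false_or]
        split_ifs with hz
        · rw [Finset.mem_erase]; rw [hmem, hmem]; simp [hxa, hoth x hxa hxb]
        · rw [hmem, hmem, hoth x hxa hxb]
  have haF : a ∈ L.toFinset := by rw [hmem]; omega
  have hbG : b ∈ (if L'.count a = 0 then L.toFinset.erase a else L.toFinset) ↔ 0 < L.count b := by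
    split_ifs with hz
    · rw [Finset.mem_erase]; simp [Ne.symm hab, hmem]
    · rw [hmem]
  have hcard1 : ((if L'.count a = 0 then L.toFinset.erase a else L.toFinset).card : Int)
      = (L.toFinset.card : Int) - (if L'.count a = 0 then 1 else 0) := by
    split_ifs with hz
    · rw [Finset.card_erase_of_mem haF]
      have : 1 ≤ L.toFinset.card := Finset.card_pos.mpr ⟨a, haF⟩
      push_cast [Nat.cast_sub this]
      ring
    · ring
  rw [hG]
  by_cases h1 : L'.count b = 1
  · have hnb : b ∉ (if L'.count a = 0 then L.toFinset.erase a else L.toFinset) := by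
      rw [hbG]; omega
    rw [Finset.card_insert_of_notMem hnb]
    push_cast
    rw [hcard1]
    simp [h1]; ring
  · have hb2 : b ∈ (if L'.count a = 0 then L.toFinset.erase a else L.toFinset) := by
      rw [hbG]; omega
    rw [Finset.insert_eq_self.mpr hb2, hcard1]
    simp [h1]

-- what one iteration of A's loop does to an invariant-satisfying state
lemma pvStepA_spec (c : List Int) (kn j : Nat) (hb : j + kn < c.length)
    (a b : Int) (hadef : c.getD (j + kn) 0 = a) (hbdef : c.getD j 0 = b)
    (st : PySem.Dict Int Int × Int × Int)
    (hI1 : ∀ x, st.1.getD x 0 = ((pvKept c kn j).count x : Int))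
    (hI2 : st.2.1 = pvF c kn j)
    (hmax : pvF c kn j ≤ st.2.2) :
    (∀ x, (pvStepA c (kn : Int) st ((kn : Int) + (j : Int))).1.getD x 0
        = ((pvKept c kn (j + 1)).count x : Int)) ∧
    (pvStepA c (kn : Int) st ((kn : Int) + (j : Int))).2.1 = pvF c kn (j + 1) ∧
    (pvStepA c (kn : Int) st ((kn : Int) + (j : Int))).2.2 = max st.2.2 (pvF c kn (j + 1)) := by
  have hci : PySem.List.pyGetD c ((kn : Int) + (j : Int)) 0 = a := by
    rw [show ((kn : Int) + (j : Int)) = ((j + kn : Nat) : Int) by push_cast; ring,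
      PySem.List.pyGetD_natCast, hadef]
  have hcik : PySem.List.pyGetD c (((kn : Int) + (j : Int)) - (kn : Int)) 0 = b := by
    rw [show ((kn : Int) + (j : Int)) - (kn : Int) = ((j : Nat) : Int) by ring,
      PySem.List.pyGetD_natCast, hbdef]
  have hcnt : ∀ x, (pvKept c kn (j + 1)).count x + (if a = x then 1 else 0)
      = (pvKept c kn j).count x + (if b = x then 1 else 0) := by
    intro x
    have := pvCount_step c kn j hb x
    rw [hadef, hbdef] at this
    exact this
  by_cases hab : a = b
  · -- equal flavors: the loop body is a no-op and the window content is a permutation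
    have hcnt' : ∀ x, (pvKept c kn (j + 1)).count x = (pvKept c kn j).count x := by
      intro x; have := hcnt x; rw [hab] at this; omega
    have hfin : (pvKept c kn (j + 1)).toFinset = (pvKept c kn j).toFinset := by
      ext x
      simp only [List.mem_toFinset, ← List.count_pos_iff, hcnt']
    have hfeq : pvF c kn (j + 1) = pvF c kn j := by
      rw [pvF_card, pvF_card, hfin]
    have hstep : pvStepA c (kn : Int) st ((kn : Int) + (j : Int)) = st := by
      simp only [pvStepA, hci, hcik, hab]
      simp
    rw [hstep]
    refine ⟨fun x => by rw [hI1, hcnt'], by rw [hI2, hfeq], ?_⟩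
    rw [hfeq]
    exact (max_eq_left hmax).symm
  · -- a real shift: counts move by -a +b
    have hca : (pvKept c kn (j + 1)).count a + 1 = (pvKept c kn j).count a := by
      have := hcnt a; rw [if_pos rfl, if_neg (Ne.symm hab)] at this; omega
    have hcb : (pvKept c kn (j + 1)).count b = (pvKept c kn j).count b + 1 := by
      have := hcnt b; rw [if_neg hab, if_pos rfl] at this; omega
    have hcard := pvCardStep (pvKept c kn j) (pvKept c kn (j + 1)) a b hab (by omega) hcnt
    have hstep : pvStepA c (kn : Int) st ((kn : Int) + (j : Int)) =
        (let d2 := (st.1.insert a (st.1.getD a 0 - 1)).insert b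
            ((st.1.insert a (st.1.getD a 0 - 1)).getD b 0 + 1)
         let num1 := if d2.getD a 0 == 0 then st.2.1 - 1 else st.2.1
         if d2.getD b 0 == 1 then (d2, num1 + 1, max (num1 + 1) st.2.2)
         else (d2, num1, st.2.2)) := by
      simp only [pvStepA, hci, hcik]
      rw [if_neg (by simp [hab])]
    rw [hstep]
    have hd2 : ∀ x, ((st.1.insert a (st.1.getD a 0 - 1)).insert b
        ((st.1.insert a (st.1.getD a 0 - 1)).getD b 0 + 1)).getD x 0
        = ((pvKept c kn (j + 1)).count x : Int) := by
      intro x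
      rw [PySem.Dict.getD_insert, PySem.Dict.getD_insert, PySem.Dict.getD_insert]
      by_cases hxb : x = b
      · subst hxb
        rw [if_pos rfl, if_neg (Ne.symm hab), hI1]
        omega
      · rw [if_neg hxb]
        by_cases hxa : x = a
        · subst hxa
          rw [if_pos rfl, hI1]
          omega
        · rw [if_neg hxa, hI1]
          have := hcnt x
          rw [if_neg (fun h => hxa h.symm), if_neg (fun h => hxb h.symm)] at this
          omega
    have hDa := hd2 a
    have hDb := hd2 b
    have e1 := pvF_card c kn (j + 1)
    have e2 := pvF_card c kn j
    by_cases hb1 : (pvKept c kn (j + 1)).count b = 1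
    · have hcb' : ((((st.1.insert a (st.1.getD a 0 - 1)).insert b
          ((st.1.insert a (st.1.getD a 0 - 1)).getD b 0 + 1)).getD b 0) == 1) = true := by
        rw [hDb]; simp [hb1]
      simp only [hcb', if_true]
      have hnum : (if (((st.1.insert a (st.1.getD a 0 - 1)).insert b
          ((st.1.insert a (st.1.getD a 0 - 1)).getD b 0 + 1)).getD a 0 == 0)
            then st.2.1 - 1 else st.2.1) + 1 = pvF c kn (j + 1) := by
        rw [hDa]
        simp only [hb1, if_pos] at hcard
        by_cases ha0 : (pvKept c kn (j + 1)).count a = 0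
        · rw [if_pos (by simp [ha0])]
          simp only [ha0, if_pos] at hcard
          rw [hI2]
          omega
        · rw [if_neg (by simp [ha0])]
          rw [if_neg ha0] at hcard
          rw [hI2]
          omega
      refine ⟨fun x => hd2 x, hnum, ?_⟩
      show max _ st.2.2 = _
      rw [hnum, max_comm]
    · have hcb' : ((((st.1.insert a (st.1.getD a 0 - 1)).insert b
          ((st.1.insert a (st.1.getD a 0 - 1)).getD b 0 + 1)).getD b 0) == 1) = false := by
        rw [hDb]; simp [hb1]
      simp only [hcb', Bool.false_eq_true, if_false]
      have hnum : (if (((st.1.insert a (st.1.getD a 0 - 1)).insert b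
          ((st.1.insert a (st.1.getD a 0 - 1)).getD b 0 + 1)).getD a 0 == 0)
            then st.2.1 - 1 else st.2.1) = pvF c kn (j + 1) := by
        rw [hDa]
        simp only [hb1, if_false] at hcard
        by_cases ha0 : (pvKept c kn (j + 1)).count a = 0
        · rw [if_pos (by simp [ha0])]
          simp only [ha0, if_pos] at hcard
          rw [hI2]
          omega
        · rw [if_neg (by simp [ha0])]
          rw [if_neg ha0] at hcard
          rw [hI2]
          omega
      refine ⟨fun x => hd2 x, hnum, ?_⟩
      show st.2.2 = _
      have hle : pvF c kn (j + 1) ≤ st.2.2 := by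
        calc pvF c kn (j + 1) ≤ pvF c kn j := by
              rw [e1, e2]
              by_cases ha0 : (pvKept c kn (j + 1)).count a = 0 <;>
                simp only [hb1, ha0, if_true, if_false] at hcard <;> omega
          _ ≤ st.2.2 := hmax
      rw [max_eq_left hle]

-- the loop invariant of A's second loop
lemma pvInvA (c : List Int) (kn : Nat) (hkn : kn ≤ c.length) :
    ∀ j, j ≤ c.length - kn →
      (∀ x, (pvIter c kn j).1.getD x 0 = ((pvKept c kn j).count x : Int)) ∧
      (pvIter c kn j).2.1 = pvF c kn j ∧
      (pvIter c kn j).2.2 = pvRunMax (pvF c kn) (j + 1) := by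
  intro j
  induction j with
  | zero =>
    intro _
    have hk0 : pvKept c kn 0 = c.drop kn := by simp [pvKept]
    have hit : pvIter c kn 0 = pvInit c kn := by simp [pvIter]
    rw [hit]
    refine ⟨fun x => ?_, ?_, ?_⟩
    · show (PySem.Dict.counter (c.drop kn)).getD x 0 = _
      rw [PySem.Dict.getD_counter, hk0]
    · show ((PySem.Set.ofList (c.drop kn)).length : Int) = _
      rw [pvF, hk0]
    · show ((PySem.Set.ofList (c.drop kn)).length : Int) = _
      rw [pvRunMax_succ]
      have h0 : pvRunMax (pvF c kn) 0 = 0 := by simp [pvRunMax]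
      rw [h0, max_eq_right (pvF_nonneg c kn 0), pvF, hk0]
  | succ j ih =>
    intro hj
    obtain ⟨ih1, ih2, ih3⟩ := ih (by omega)
    have hit : pvIter c kn (j + 1) = pvStepA c (kn : Int) (pvIter c kn j) ((kn : Int) + (j : Int)) := by
      simp [pvIter, List.range_succ]
    have hmax : pvF c kn j ≤ (pvIter c kn j).2.2 := by
      rw [ih3]; exact pvLe_runMax _ (by omega)
    obtain ⟨s1, s2, s3⟩ := pvStepA_spec c kn j (by omega) _ _ rfl rfl _ ih1 ih2 hmax
    rw [hit]
    refine ⟨s1, s2, ?_⟩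
    rw [s3, ih3, pvRunMax_succ (pvF c kn) (j + 1), pvRunMax_succ]

lemma pvA_eq (c : List Int) (kn : Nat) (h0 : kn ≠ 0) (hle : kn ≤ c.length) :
    shareCandies c (kn : Int) = pvRunMax (pvF c kn) (c.length - kn + 1) := by
  unfold shareCandies
  rw [if_neg (by simp; omega)]
  dsimp only
  have h1 : (PySem.List.pyRange (kn : Int) ((c.length : Nat) : Int) 1).foldl
      (fun (d : PySem.Dict Int Int) i =>
        d.insert (PySem.List.pyGetD c i 0) (d.getD (PySem.List.pyGetD c i 0) 0 + 1))
      PySem.Dict.empty = PySem.Dict.counter (c.drop kn) := by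
    rw [PySem.List.foldl_pyRange_pyGetD' c 0
      (fun (d : PySem.Dict Int Int) x => d.insert x (d.getD x 0 + 1)) PySem.Dict.empty
      (by omega : (0 : Int) ≤ (kn : Int))]
    rw [Int.toNat_natCast]
    exact PySem.Dict.foldl_insert_getD_add_one_eq_counter _
  rw [h1]
  have h2 : (PySem.Dict.counter (c.drop kn)).keys = PySem.Set.ofList (c.drop kn) :=
    PySem.Dict.keys_counter _
  rw [h2]
  have h3 : PySem.List.pyRange (kn : Int) ((c.length : Nat) : Int) 1
      = (List.range (c.length - kn)).map (fun t : Nat => (kn : Int) + (t : Int)) := by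
    rw [PySem.List.pyRange_one,
      show (((c.length : Nat) : Int) - ((kn : Nat) : Int)).toNat = c.length - kn from by omega]
  rw [h3, List.foldl_map]
  have h4 := (pvInvA c kn hle (c.length - kn) (by omega)).2.2
  show (pvIter c kn (c.length - kn)).2.2 = _
  rw [h4]

lemma pvB_eq (c : List Int) (kn : Nat) :
    shareCandies_alt c (kn : Int) = pvRunMax (pvF c kn) (((c.length : Int) - (kn : Int) + 1).toNat) := by
  unfold shareCandies_alt pvRunMax
  dsimp only
  rw [PySem.List.pyRange_one, List.foldl_map]
  have hz : ((c.length : Int) - (kn : Int) + 1 - 0).toNat = ((c.length : Int) - (kn : Int) + 1).toNat := by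
    omega
  rw [hz]
  apply List.foldl_ext
  intro b t _
  rw [show (0 : Int) + (t : Int) + (kn : Int) = ((t + kn : Nat) : Int) from by push_cast; ring,
    show (0 : Int) + (t : Int) = ((t : Nat) : Int) from by omega,
    PySem.List.slice_to_natCast, PySem.List.slice_from_natCast]
  rfl

-- ===== VERDICT (by name: the statement is the Claim_ definition above) =====
theorem shareCandies_spec : Claim_equal_shareCandies := by
  intro c k _hdom hpre
  obtain ⟨kn, rfl⟩ := Int.eq_ofNat_of_zero_le hpre
  unfold Spec_shareCandies
  rw [pvB_eq]
  by_cases h0 : kn = 0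
  · subst h0
    have hL : ∀ s, pvF c 0 s = ((PySem.Set.ofList c).length : Int) := by
      intro s; simp [pvF, pvKept]
    have hfun : (pvF c 0) = fun _ => ((PySem.Set.ofList c).length : Int) := funext hL
    have hm : (((c.length : Int) - ((0 : Nat) : Int) + 1).toNat) = c.length + 1 := by
      push_cast; omega
    rw [hm, hfun, pvRunMax_const _ (Int.natCast_nonneg _)]
    simp [shareCandies]
  · by_cases hle : kn ≤ c.length
    · rw [pvA_eq c kn h0 hle]
      congr 1
      omega
    · have hm : (((c.length : Int) - ((kn : Nat) : Int) + 1).toNat) = 0 := by omega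
      rw [hm]
      have hA : shareCandies c (kn : Int) = 0 := by
        have hnil : PySem.List.pyRange (kn : Int) ((c.length : Nat) : Int) 1 = [] :=
          PySem.List.pyRange_one_eq_nil (by omega)
        have hne : ¬ (((kn : Nat) : Int) == 0) = true := by simp; omega
        simp [shareCandies, hne, hnil]
      rw [hA]
      simp [pvRunMax]
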